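-- pv_equiv track=rewrite | github.com/mtdewwolf/adventofcode2024 | day1/day1part2.py | calculate_total_distance_with_swaps
-- ===== SOURCE A (Python) =====
-- def calculate_total_distance_with_swaps(left_list, right_list):
--     left_sorted = sorted(left_list)
--     right_sorted = sorted(right_list)
--     min_total_distance = sum(abs(l - r) for l, r in zip(left_sorted, right_sorted))
--
--     n = len(left_list)
--     for i in range(n):
--         for j in range(i + 1, n):
--             left_copy = left_sorted.copy()
--             left_copy[i], left_copy[j] = left_copy[j], left_copy[i]
--             distance = sum(abs(l - r) for l, r in zip(left_copy, right_sorted))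
--             min_total_distance = min(min_total_distance, distance)
--
--             right_copy = right_sorted.copy()
--             right_copy[i], right_copy[j] = right_copy[j], right_copy[i]
--             distance = sum(abs(l - r) for l, r in zip(left_sorted, right_copy))
--             min_total_distance = min(min_total_distance, distance)
--
--     return min_total_distance
-- ===== SOURCE B (Python) =====
-- def calculate_total_distance_with_swaps(left_list, right_list):
--     # Sorted-ascending pairing is optimal (rearrangement inequality): swapping two
--     # entries of either sorted list never decreases the total distance, so the
--     # minimum is just the base sorted-pairing sum.
--     total = 0
--     for l, r in zip(sorted(left_list), sorted(right_list)):
--         total += abs(l - r)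
--     return total
-- ===== Notes on version B (the rewrite author's own statement) =====
-- stated objective: faster
-- what changed: B drops the O(n^2) swap enumeration entirely: by the rearrangement inequality no pairwise swap of a sorted list can beat the sorted-sorted pairing, so B returns the base sum over zip(sorted(left), sorted(right)) in a single pass.
import Mathlib
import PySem

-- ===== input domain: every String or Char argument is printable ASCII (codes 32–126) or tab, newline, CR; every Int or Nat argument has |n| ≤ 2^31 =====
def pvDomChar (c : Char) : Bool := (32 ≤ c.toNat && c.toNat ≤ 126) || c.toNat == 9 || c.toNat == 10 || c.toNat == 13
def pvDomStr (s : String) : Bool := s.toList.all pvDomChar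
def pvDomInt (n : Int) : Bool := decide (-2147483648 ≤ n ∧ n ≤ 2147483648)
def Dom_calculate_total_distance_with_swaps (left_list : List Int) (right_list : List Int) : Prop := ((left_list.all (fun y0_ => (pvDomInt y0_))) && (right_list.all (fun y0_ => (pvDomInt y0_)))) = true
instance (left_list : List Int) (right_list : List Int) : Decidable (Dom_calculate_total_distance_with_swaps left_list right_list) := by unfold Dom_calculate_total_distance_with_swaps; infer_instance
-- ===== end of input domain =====

-- B replaces A's O(n^3) enumeration of all pairwise swaps by the base sorted-pairing
-- sum alone (rearrangement inequality: no swap beats sorted matching); objective: faster.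

-- ===== PORT A =====
-- sum(abs(l - r) for l, r in zip(xs, ys))
def pvAbsSum (xs ys : List Int) : Int :=
  ((xs.zip ys).map (fun p => |p.1 - p.2|)).sum

def calculate_total_distance_with_swaps (left_list : List Int) (right_list : List Int) : Int :=
  let left_sorted := PySem.List.sorted left_list (fun x => x) false
  let right_sorted := PySem.List.sorted right_list (fun x => x) false
  let min_total_distance := pvAbsSum left_sorted right_sorted
  let n : Int := left_list.length
  (PySem.List.pyRange 0 n 1).foldl (fun acc i =>
    (PySem.List.pyRange (i + 1) n 1).foldl (fun acc j =>
      -- left_copy[i], left_copy[j] = left_copy[j], left_copy[i]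
      -- (pySetD/pyGetD are the total forms; Python raises IndexError out of range,
      --  which happens only for the right swap and only outside Pre_)
      let left_copy := PySem.List.pySetD (PySem.List.pySetD left_sorted i
        (PySem.List.pyGetD left_sorted j 0)) j (PySem.List.pyGetD left_sorted i 0)
      let acc2 := min acc (pvAbsSum left_copy right_sorted)
      let right_copy := PySem.List.pySetD (PySem.List.pySetD right_sorted i
        (PySem.List.pyGetD right_sorted j 0)) j (PySem.List.pyGetD right_sorted i 0)
      min acc2 (pvAbsSum left_sorted right_copy)) acc) min_total_distance

-- ===== PORT B =====
def calculate_total_distance_with_swaps_alt (left_list : List Int) (right_list : List Int) : Int :=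
  ((PySem.List.sorted left_list (fun x => x) false).zip
    (PySem.List.sorted right_list (fun x => x) false)).foldl
    (fun total p => total + |p.1 - p.2|) 0

-- ===== PRECONDITION & SPEC =====
-- Pre_ excludes exactly the inputs where A raises IndexError: len(left) ≥ 2 with a
-- strictly shorter right list (right_copy[j] is indexed past the end of right_sorted).
def Pre_calculate_total_distance_with_swaps (left_list : List Int) (right_list : List Int) : Prop :=
  left_list.length ≤ right_list.length ∨ left_list.length ≤ 1
instance (left_list : List Int) (right_list : List Int) : Decidable (Pre_calculate_total_distance_with_swaps left_list right_list) := by unfold Pre_calculate_total_distance_with_swaps; infer_instance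

def pvWitness_calculate_total_distance_with_swaps : List Int × List Int := ([3, 1, 2], [5, 4, 9])

def Spec_calculate_total_distance_with_swaps (left_list : List Int) (right_list : List Int) (out : Int) : Prop := out = calculate_total_distance_with_swaps_alt left_list right_list
instance (left_list : List Int) (right_list : List Int) (out : Int) : Decidable (Spec_calculate_total_distance_with_swaps left_list right_list out) := by unfold Spec_calculate_total_distance_with_swaps; infer_instance

-- ===== CLAIM (what is proved, stated in full; the proofs are below) =====
def Claim_equal_calculate_total_distance_with_swaps : Prop := ∀ (left_list : List Int) (right_list : List Int), Dom_calculate_total_distance_with_swaps left_list right_list → Pre_calculate_total_distance_with_swaps left_list right_list → Spec_calculate_total_distance_with_swaps left_list right_list (calculate_total_distance_with_swaps left_list right_list)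


-- ===== LEMMAS AND PROOFS =====

-- pvAbsSum as an indexed sum over the common prefix
lemma pvAbsSum_eq_sum (xs ys : List Int) :
    pvAbsSum xs ys =
      ∑ k ∈ Finset.range (min xs.length ys.length), |xs.getD k 0 - ys.getD k 0| := by
  induction xs generalizing ys with
  | nil => simp [pvAbsSum]
  | cons x xs ih =>
    cases ys with
    | nil => simp [pvAbsSum]
    | cons y ys =>
      have : min (x :: xs).length (y :: ys).length = min xs.length ys.length + 1 := by
        simp [Nat.succ_min_succ]
      rw [this, Finset.sum_range_succ']
      simp only [List.getD_cons_succ, List.getD_cons_zero]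
      have := ih ys
      simp [pvAbsSum] at this ⊢
      omega

lemma pvAbsSum_comm (xs ys : List Int) : pvAbsSum xs ys = pvAbsSum ys xs := by
  unfold pvAbsSum
  rw [← List.zip_swap ys xs, List.map_map]
  simp [Function.comp_def, Prod.swap, abs_sub_comm]

-- the exchange step: sorted pairing beats any transposition
lemma abs_exchange (a b c d : Int) (hab : a ≤ b) (hcd : c ≤ d) :
    |a - c| + |b - d| ≤ |b - c| + |a - d| := by
  rcases abs_cases (a - c) with ⟨h1, _⟩ | ⟨h1, _⟩ <;>
  rcases abs_cases (b - d) with ⟨h2, _⟩ | ⟨h2, _⟩ <;>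
  rcases abs_cases (b - c) with ⟨h3, _⟩ | ⟨h3, _⟩ <;>
  rcases abs_cases (a - d) with ⟨h4, _⟩ | ⟨h4, _⟩ <;>
  omega

lemma getD_set_eq (l : List Int) (i : Nat) (a : Int) (h : i < l.length) :
    (l.set i a).getD i 0 = a := by
  rw [List.getD_eq_getElem?_getD, List.getElem?_set_self (by omega)]
  simp

lemma getD_set_ne (l : List Int) (i j : Nat) (a : Int) (h : i ≠ j) :
    (l.set i a).getD j 0 = l.getD j 0 := by
  rw [List.getD_eq_getElem?_getD, List.getElem?_set_ne h, ← List.getD_eq_getElem?_getD]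

lemma swap_ge (X Y : List Int) (p q : Nat) (hpq : p < q)
    (hqx : q < X.length) (hqy : q < Y.length)
    (hx : X.getD p 0 ≤ X.getD q 0) (hy : Y.getD p 0 ≤ Y.getD q 0) :
    pvAbsSum X Y ≤ pvAbsSum ((X.set p (X.getD q 0)).set q (X.getD p 0)) Y := by
  set X' := (X.set p (X.getD q 0)).set q (X.getD p 0) with hX'
  have hlen : X'.length = X.length := by simp [hX']
  rw [pvAbsSum_eq_sum, pvAbsSum_eq_sum, hlen]
  set m := min X.length Y.length with hm
  have hpm : p ∈ Finset.range m := by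
    simp [hm, Finset.mem_range]; omega
  have hqm : q ∈ (Finset.range m).erase p := by
    simp [hm, Finset.mem_range]; omega
  have key : ∀ (Z : List Int), ∑ k ∈ Finset.range m, |Z.getD k 0 - Y.getD k 0| =
      |Z.getD p 0 - Y.getD p 0| + (|Z.getD q 0 - Y.getD q 0| +
        ∑ k ∈ ((Finset.range m).erase p).erase q, |Z.getD k 0 - Y.getD k 0|) := by
    intro Z
    rw [← Finset.add_sum_erase _ _ hpm, ← Finset.add_sum_erase _ _ hqm]
  rw [key X, key X']
  have e1 : X'.getD p 0 = X.getD q 0 := by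
    rw [hX', getD_set_ne _ q p _ (by omega), getD_set_eq _ _ _ (by omega)]
  have e2 : X'.getD q 0 = X.getD p 0 := by
    rw [hX', getD_set_eq _ _ _ (by simp; omega)]
  have e3 : ∀ k ∈ ((Finset.range m).erase p).erase q, X'.getD k 0 = X.getD k 0 := by
    intro k hk
    simp only [Finset.mem_erase] at hk
    rw [hX', getD_set_ne _ q k _ (by omega), getD_set_ne _ p k _ (by omega)]
  have e4 : ∑ k ∈ ((Finset.range m).erase p).erase q, |X'.getD k 0 - Y.getD k 0| =
      ∑ k ∈ ((Finset.range m).erase p).erase q, |X.getD k 0 - Y.getD k 0| :=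
    Finset.sum_congr rfl (fun k hk => by rw [e3 k hk])
  rw [e1, e2, e4]
  have := abs_exchange (X.getD p 0) (X.getD q 0) (Y.getD p 0) (Y.getD q 0) hx hy
  omega

-- sortedness in getD form
lemma sorted_getD_mono (xs : List Int) (p q : Nat) (hpq : p ≤ q)
    (hq : q < xs.length) :
    (PySem.List.sorted xs (fun x => x) false).getD p 0 ≤
      (PySem.List.sorted xs (fun x => x) false).getD q 0 := by
  have hlen : (PySem.List.sorted xs (fun x => x) false).length = xs.length :=
    PySem.List.length_sorted xs _ _
  have hq' : q < (PySem.List.sorted xs (fun x => x) false).length := by omega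
  have := PySem.List.sorted_id_getElem_mono (xs := xs) (p := p) (q := q) hpq hq'
  rw [List.getD_eq_getElem?_getD, List.getD_eq_getElem?_getD,
    List.getElem?_eq_getElem hq', List.getElem?_eq_getElem (by omega)]
  simpa using this

lemma foldl_fixed {β : Type} (l : List β) (f : Int → β → Int) (a : Int)
    (h : ∀ x ∈ l, f a x = a) : l.foldl f a = a := by
  induction l with
  | nil => rfl
  | cons x l ih =>
    rw [List.foldl_cons, h x (List.mem_cons_self), ih (fun y hy => h y (List.mem_cons_of_mem _ hy))]

-- B's fold computes pvAbsSum
lemma alt_eq_pvAbsSum (left_list right_list : List Int) :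
    calculate_total_distance_with_swaps_alt left_list right_list =
      pvAbsSum (PySem.List.sorted left_list (fun x => x) false)
        (PySem.List.sorted right_list (fun x => x) false) := by
  unfold calculate_total_distance_with_swaps_alt pvAbsSum
  rw [List.sum_eq_foldl, List.foldl_map]

-- ===== VERDICT (by name: the statement is the Claim_ definition above) =====
theorem calculate_total_distance_with_swaps_spec : Claim_equal_calculate_total_distance_with_swaps := by
  unfold Claim_equal_calculate_total_distance_with_swaps
  intro left_list right_list _ hpre
  unfold Spec_calculate_total_distance_with_swaps
  rw [alt_eq_pvAbsSum]
  unfold calculate_total_distance_with_swaps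
  set L := PySem.List.sorted left_list (fun x => x) false with hL
  set R := PySem.List.sorted right_list (fun x => x) false with hR
  have hLlen : L.length = left_list.length := PySem.List.length_sorted _ _ _
  have hRlen : R.length = right_list.length := PySem.List.length_sorted _ _ _
  set n : Int := (left_list.length : Int) with hn
  set base := pvAbsSum L R with hbase
  apply foldl_fixed
  intro i hi
  rw [PySem.List.mem_pyRange_one] at hi
  apply foldl_fixed
  intro j hj
  rw [PySem.List.mem_pyRange_one] at hj
  -- indices as naturals
  set p := i.toNat with hp
  set q := j.toNat with hq
  have hij : 0 ≤ i ∧ i + 1 ≤ j ∧ j < n := ⟨hi.1, hj.1, hj.2⟩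
  have hpq : p < q := by omega
  have hqn : q < left_list.length := by omega
  have hpre' : left_list.length ≤ right_list.length := by
    rcases hpre with h | h
    · exact h
    · omega
  have hic : i = (p : Int) := by omega
  have hjc : j = (q : Int) := by omega
  rw [hic, hjc]
  simp only [PySem.List.pySetD_natCast, PySem.List.pyGetD_natCast]
  have hd1 : base ≤ pvAbsSum ((L.set p (L.getD q 0)).set q (L.getD p 0)) R := by
    apply swap_ge L R p q hpq (by omega) (by omega)
    · exact sorted_getD_mono left_list p q (by omega) (by omega)
    · exact sorted_getD_mono right_list p q (by omega) (by omega)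
  have hd2 : base ≤ pvAbsSum L ((R.set p (R.getD q 0)).set q (R.getD p 0)) := by
    rw [pvAbsSum_comm L, hbase, pvAbsSum_comm L]
    apply swap_ge R L p q hpq (by omega) (by omega)
    · exact sorted_getD_mono right_list p q (by omega) (by omega)
    · exact sorted_getD_mono left_list p q (by omega) (by omega)
  rw [min_eq_left hd1, min_eq_left hd2]
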